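-- pv_equiv track=rewrite | github.com/alby69/py2c64 | lib/optimizer.py | _remove_dead_loads
-- ===== SOURCE A (Python) =====
-- from typing import List
--
-- def _remove_dead_loads(lines: List[str]) -> List[str]:
--     """Removes redundant LDA/STA instructions."""
--     result = []
--     i = 0
--
--     while i < len(lines):
--         line = lines[i].strip()
--
--         # Look for pattern: LDA addr followed by STA addr (same address)
--         if (line.startswith("LDA ") and
--             i + 1 < len(lines) and
--             lines[i + 1].strip() == f"STA {line[4:]}"):
--             # Skip both instructions
--             i += 2
--             continue
--
--         result.append(lines[i])
--         i += 1
--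
--     return result
-- ===== SOURCE B (Python) =====
-- from typing import List
--
--
-- def _is_dead_pair(cur: str, nxt: str) -> bool:
--     s = cur.strip()
--     return s.startswith("LDA ") and nxt.strip() == f"STA {s[4:]}"
--
--
-- def _remove_dead_loads(lines: List[str]) -> List[str]:
--     """Mark-then-filter: flag each dead LDA/STA pair, then keep unflagged lines."""
--     pair = [_is_dead_pair(a, b) for a, b in zip(lines, lines[1:])]
--     keep = [not (p or q) for p, q in zip(pair + [False], [False] + pair)]
--     return [ln for ln, k in zip(lines, keep) if k]
-- ===== Notes on version B (the rewrite author's own statement) =====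
-- stated objective: simpler
-- what changed: A's single index-jumping while loop (i += 2 on a dead LDA/STA pair) is replaced by a mark-then-filter decomposition: one pairwise zip pass flags each dead pair, then a filter keeps the unflagged original lines.
import Mathlib
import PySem

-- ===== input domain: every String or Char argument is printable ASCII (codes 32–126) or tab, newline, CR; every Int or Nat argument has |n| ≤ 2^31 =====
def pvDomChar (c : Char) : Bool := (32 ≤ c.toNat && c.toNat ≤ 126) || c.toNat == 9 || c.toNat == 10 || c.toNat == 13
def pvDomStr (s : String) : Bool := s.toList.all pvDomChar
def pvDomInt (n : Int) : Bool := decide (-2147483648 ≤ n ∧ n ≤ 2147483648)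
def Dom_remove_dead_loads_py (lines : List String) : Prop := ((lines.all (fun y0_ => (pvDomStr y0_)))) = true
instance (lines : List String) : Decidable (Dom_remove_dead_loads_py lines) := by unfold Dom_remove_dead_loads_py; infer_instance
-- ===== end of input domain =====

-- B replaces A's index-jumping while loop by a mark-then-filter decomposition (flag dead
-- LDA/STA pairs in one pairwise pass, then keep the unflagged lines); objective: simpler.

-- ===== PORT A =====
-- literal port of A's while loop: each step strips the current line, tests for a dead
-- LDA/STA pair with the next line, and either skips both or keeps the line and advances.
def remove_dead_loads_py (lines : List String) : List String :=
  match lines with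
  | [] => []
  | [x] => [x]  -- i + 1 < len(lines) fails: the last line is always kept
  | x :: y :: rest =>
    if PySem.Str.startswith (PySem.Str.strip x) "LDA " &&
       (PySem.Str.strip y == "STA " ++ PySem.Str.slice (PySem.Str.strip x) (some 4) none) then
      remove_dead_loads_py rest
    else
      x :: remove_dead_loads_py (y :: rest)

-- ===== PORT B =====
-- helper _is_dead_pair of Source B
def is_dead_pair (cur nxt : String) : Bool :=
  let s := PySem.Str.strip cur
  PySem.Str.startswith s "LDA " && (PySem.Str.strip nxt == "STA " ++ PySem.Str.slice s (some 4) none)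

def remove_dead_loads_py_alt (lines : List String) : List String :=
  let pair := List.zipWith is_dead_pair lines (PySem.List.slice lines (some 1) none)
  let keep := List.zipWith (fun p q => !(p || q)) (pair ++ [false]) (false :: pair)
  ((List.zip lines keep).filter (fun lk => lk.2)).map (fun lk => lk.1)

-- ===== PRECONDITION & SPEC =====
def Spec_remove_dead_loads_py (lines : List String) (out : List String) : Prop := out = remove_dead_loads_py_alt lines
instance (lines : List String) (out : List String) : Decidable (Spec_remove_dead_loads_py lines out) := by unfold Spec_remove_dead_loads_py; infer_instance

-- ===== CLAIM (what is proved, stated in full; the proofs are below) =====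
def Claim_equal_remove_dead_loads_py : Prop := ∀ (lines : List String), Dom_remove_dead_loads_py lines → Spec_remove_dead_loads_py lines (remove_dead_loads_py lines)

-- ===== LEMMAS AND PROOFS =====

-- B's mark-then-filter generalized over the incoming "previous pair was dead" flag.
def altK (q0 : Bool) (ls : List String) : List String :=
  let pair := List.zipWith is_dead_pair ls ls.tail
  let keep := List.zipWith (fun p q => !(p || q)) (pair ++ [false]) (q0 :: pair)
  ((List.zip ls keep).filter (fun lk => lk.2)).map (fun lk => lk.1)

theorem alt_eq_altK (ls : List String) : remove_dead_loads_py_alt ls = altK false ls := by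
  simp [remove_dead_loads_py_alt, altK, PySem.List.slice_from_one]

theorem altK_nil (q0 : Bool) : altK q0 [] = [] := by simp [altK]

theorem altK_one (q0 : Bool) (x : String) : altK q0 [x] = if q0 then [] else [x] := by
  cases q0 <;> simp [altK]

theorem altK_cons2 (q0 : Bool) (x y : String) (rest : List String) :
    altK q0 (x :: y :: rest) =
      (if is_dead_pair x y || q0 then [] else [x]) ++ altK (is_dead_pair x y) (y :: rest) := by
  cases hxy : is_dead_pair x y <;> cases q0 <;> simp [altK, hxy]

-- a line that is the STA half of a dead pair can never start another dead pair
theorem nonoverlap {x y : String} (h : is_dead_pair x y = true) (z : String) :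
    is_dead_pair y z = false := by
  unfold is_dead_pair at h ⊢
  simp only [Bool.and_eq_true, beq_iff_eq] at h
  rw [h.2]
  simp [pysem]

theorem altK_true_of_sta {y : String} (rest : List String)
    (hy : ∀ z, is_dead_pair y z = false) : altK true (y :: rest) = altK false rest := by
  cases rest with
  | nil => simp [altK_nil, altK_one]
  | cons z r => rw [altK_cons2]; simp [hy z, altK]

theorem a_eq_altK (ls : List String) : remove_dead_loads_py ls = altK false ls := by
  induction ls using remove_dead_loads_py.induct with
  | case1 => rw [remove_dead_loads_py, altK_nil]
  | case2 x => rw [remove_dead_loads_py]; simp [altK_one]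
  | case3 x y rest h ih =>
    have hp : is_dead_pair x y = true := by simpa [is_dead_pair] using h
    rw [remove_dead_loads_py, if_pos h, altK_cons2, hp]
    simp only [Bool.true_or, if_true, List.nil_append]
    rw [altK_true_of_sta rest (nonoverlap hp), ih]
  | case4 x y rest h ih =>
    have hp : is_dead_pair x y = false := by simpa [is_dead_pair] using h
    rw [remove_dead_loads_py, if_neg h, altK_cons2, hp]
    simp [ih]

-- ===== VERDICT (by name: the statement is the Claim_ definition above) =====
theorem remove_dead_loads_py_spec : Claim_equal_remove_dead_loads_py := by
  intro lines _
  unfold Spec_remove_dead_loads_py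
  rw [alt_eq_altK, a_eq_altK]
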